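-- pv_equiv track=rewrite | github.com/Anchovia/AnchoviaBOJ | Python/Pending/Silver/Silver5/10709.py | solution
-- ===== SOURCE A (Python) =====
-- def solution(cloudList):
--     matrixList = list()
--
--     for nowStrs in cloudList:
--         rawMatrixList = list()
--
--         matrixCount = -1
--         cloudJudg = False
--
--         for nowStr in nowStrs:
--             if cloudJudg:
--                 matrixCount += 1
--
--             if nowStr == "c":
--                 cloudJudg = True
--                 matrixCount = 0
--
--             rawMatrixList.append(matrixCount)
--
--         matrixList.append(rawMatrixList)
--
--     return matrixList
-- ===== SOURCE B (Python) =====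
-- def solution(cloudList):
--     matrixList = []
--     for nowStrs in cloudList:
--         parts = nowStrs.split("c")
--         rawMatrixList = [-1] * len(parts[0])
--         for p in parts[1:]:
--             rawMatrixList.extend(range(len(p) + 1))
--         matrixList.append(rawMatrixList)
--     return matrixList
-- ===== Notes on version B (the rewrite author's own statement) =====
-- stated objective: alternative
-- what changed: Instead of scanning each row character by character with a boolean flag and a resettable counter, B splits the row at every 'c' and builds the output from whole blocks: a run of -1 for the prefix before the first 'c', then for each later segment the block 0,1,...,len(segment).
import Mathlib
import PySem

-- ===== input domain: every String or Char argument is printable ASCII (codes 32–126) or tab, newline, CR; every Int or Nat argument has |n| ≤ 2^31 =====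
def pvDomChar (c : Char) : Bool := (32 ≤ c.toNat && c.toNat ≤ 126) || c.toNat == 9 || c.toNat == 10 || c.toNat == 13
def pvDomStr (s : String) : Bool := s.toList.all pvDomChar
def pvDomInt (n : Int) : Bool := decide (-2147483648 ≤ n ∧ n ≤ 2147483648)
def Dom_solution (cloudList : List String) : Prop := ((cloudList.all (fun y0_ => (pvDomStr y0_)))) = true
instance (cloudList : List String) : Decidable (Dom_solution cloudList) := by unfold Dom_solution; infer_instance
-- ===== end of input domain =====

-- B replaces A's char-by-char scan (boolean flag + resettable counter) with split-at-'c' and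
-- whole-block output construction (objective: alternative, same cost).

-- ===== PORT A =====
-- inner loop of A: state = (matrixCount, cloudJudg); emits the appended value per char
def solLoopA : List Char → Int → Bool → List Int
  | [], _, _ => []
  | c :: rest, matrixCount, cloudJudg =>
    let m1 := if cloudJudg then matrixCount + 1 else matrixCount
    let m2 := if c = 'c' then (0 : Int) else m1
    let j2 := if c = 'c' then true else cloudJudg
    m2 :: solLoopA rest m2 j2

def solution (cloudList : List String) : List (List Int) :=
  cloudList.map (fun nowStrs => solLoopA nowStrs.toList (-1) false)

-- ===== PORT B =====
-- the 'for p in parts[1:]: out.extend(range(len(p)+1))' loop of Source B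
def partsOut : List (List Char) → List Int
  | [] => []
  | p :: ps => PySem.List.pyRange 0 (p.length + 1) 1 ++ partsOut ps

def solution_alt (cloudList : List String) : List (List Int) :=
  cloudList.map (fun nowStrs =>
    match PySem.Chars.splitOn nowStrs.toList ['c'] with
    | [] => []  -- unreachable: str.split always yields at least one piece
    | p0 :: rest => List.replicate p0.length (-1) ++ partsOut rest)

-- ===== PRECONDITION & SPEC =====
def Spec_solution (cloudList : List String) (out : List (List Int)) : Prop := out = solution_alt cloudList
instance (cloudList : List String) (out : List (List Int)) : Decidable (Spec_solution cloudList out) := by unfold Spec_solution; infer_instance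

-- ===== CLAIM (what is proved, stated in full; the proofs are below) =====
def Claim_equal_solution : Prop := ∀ (cloudList : List String), Dom_solution cloudList → Spec_solution cloudList (solution cloudList)

-- ===== LEMMAS AND PROOFS =====

-- natural (fuel-free) recursion computed by Chars.splitOn on a one-char separator;
-- pre is the reversed-accumulator current piece
def splitSpec (pre : List Char) : List Char → List (List Char)
  | [] => [pre]
  | a :: rest => if a = 'c' then pre :: splitSpec [] rest else splitSpec (pre ++ [a]) rest

theorem splitOn_go_spec : ∀ (l : List Char) (fuel : Nat) (cur : List Char) (acc : List (List Char)),
    l.length < fuel →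
    PySem.Chars.splitOn.go ['c'] fuel l cur acc = acc.reverse ++ splitSpec cur.reverse l := by
  intro l
  induction l with
  | nil =>
    intro fuel cur acc h
    match fuel, h with
    | fuel + 1, _ => simp [PySem.Chars.splitOn.go, splitSpec]
  | cons a rest ih =>
    intro fuel cur acc h
    match fuel, h with
    | fuel + 1, h =>
      by_cases ha : a = 'c'
      · subst ha
        rw [show PySem.Chars.splitOn.go ['c'] (fuel + 1) ('c' :: rest) cur acc
              = PySem.Chars.splitOn.go ['c'] fuel rest [] (cur.reverse :: acc) by
            simp [PySem.Chars.splitOn.go, List.isPrefixOf]]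
        rw [ih fuel [] (cur.reverse :: acc) (by simpa using Nat.lt_of_succ_lt_succ h)]
        simp [splitSpec]
      · rw [show PySem.Chars.splitOn.go ['c'] (fuel + 1) (a :: rest) cur acc
              = PySem.Chars.splitOn.go ['c'] fuel rest (a :: cur) acc by
            simp [PySem.Chars.splitOn.go, List.isPrefixOf, (Ne.symm ha)]]
        rw [ih fuel (a :: cur) acc (by simpa using Nat.lt_of_succ_lt_succ h)]
        simp [splitSpec, ha]

theorem splitOn_eq_spec (cs : List Char) :
    PySem.Chars.splitOn cs ['c'] = splitSpec [] cs := by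
  rw [PySem.Chars.splitOn, splitOn_go_spec cs (cs.length + 1) [] [] (Nat.lt_succ_self _)]
  simp

theorem splitSpec_append_no_c : ∀ (p pre l : List Char), 'c' ∉ p →
    splitSpec pre (p ++ l) = splitSpec (pre ++ p) l := by
  intro p
  induction p with
  | nil => intro pre l _; simp
  | cons a rest ih =>
    intro pre l hp
    have ha : a ≠ 'c' := fun h => hp (h ▸ List.mem_cons_self)
    have : splitSpec pre ((a :: rest) ++ l) = splitSpec (pre ++ [a]) (rest ++ l) := by
      simp [splitSpec, ha]
    rw [this, ih (pre ++ [a]) l (fun h => hp (List.mem_cons_of_mem _ h))]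
    simp

theorem splitOn_no_c (cs : List Char) (h : 'c' ∉ cs) :
    PySem.Chars.splitOn cs ['c'] = [cs] := by
  rw [splitOn_eq_spec]
  have := splitSpec_append_no_c cs [] [] h
  simpa [splitSpec] using this

theorem splitOn_first_c (p rest : List Char) (h : 'c' ∉ p) :
    PySem.Chars.splitOn (p ++ 'c' :: rest) ['c'] = p :: PySem.Chars.splitOn rest ['c'] := by
  rw [splitOn_eq_spec, splitOn_eq_spec, splitSpec_append_no_c p [] ('c' :: rest) h]
  simp [splitSpec]

-- splitSpec never returns the empty list
theorem splitSpec_ne_nil : ∀ (l pre : List Char), splitSpec pre l ≠ [] := by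
  intro l
  induction l with
  | nil => intro pre h; simp [splitSpec] at h
  | cons a rest ih =>
    intro pre h
    by_cases ha : a = 'c' <;> simp [splitSpec, ha] at h
    exact ih _ h

-- A's loop on a c-free block, flag already true: counts k+1, k+2, …
theorem solLoopA_true_no_c : ∀ (p : List Char) (k : Int), 'c' ∉ p →
    solLoopA p k true = PySem.List.pyRange (k + 1) (k + 1 + p.length) 1 := by
  intro p
  induction p with
  | nil => intro k _; simp [solLoopA, PySem.List.pyRange_one_eq_nil]
  | cons a rest ih =>
    intro k hp
    have ha : a ≠ 'c' := fun h => hp (h ▸ List.mem_cons_self)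
    rw [PySem.List.pyRange_one_cons (by push_cast [List.length_cons]; omega)]
    simp only [solLoopA, ha, if_false, if_true]
    rw [ih (k + 1) (fun h => hp (List.mem_cons_of_mem _ h))]
    have : k + 1 + 1 + (rest.length : Int) = k + 1 + ((a :: rest).length : Int) := by
      push_cast [List.length_cons]; omega
    rw [this]

-- A's loop on a c-free block followed by more input, flag true
theorem solLoopA_true_append : ∀ (p : List Char) (l : List Char) (k : Int), 'c' ∉ p →
    solLoopA (p ++ l) k true
      = PySem.List.pyRange (k + 1) (k + 1 + p.length) 1 ++ solLoopA l (k + p.length) true := by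
  intro p
  induction p with
  | nil => intro l k _; simp [PySem.List.pyRange_one_eq_nil]
  | cons a rest ih =>
    intro l k h
    have ha : a ≠ 'c' := fun hh => h (hh ▸ List.mem_cons_self)
    rw [List.cons_append]
    simp only [solLoopA, ha, if_false, reduceIte]
    rw [PySem.List.pyRange_one_cons (by push_cast [List.length_cons]; omega)]
    rw [ih l (k + 1) (fun hh => h (List.mem_cons_of_mem _ hh))]
    simp only [List.cons_append]
    have h1 : k + 1 + 1 + (rest.length : Int) = k + 1 + ((a :: rest).length : Int) := by
      push_cast [List.length_cons]; omega
    have h2 : k + 1 + (rest.length : Int) = k + ((a :: rest).length : Int) := by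
      push_cast [List.length_cons]; omega
    rw [h1, h2]

-- A's loop before any 'c' on a c-free block: all -1
theorem solLoopA_false_no_c : ∀ (p : List Char), 'c' ∉ p →
    solLoopA p (-1) false = List.replicate p.length (-1) := by
  intro p
  induction p with
  | nil => intro _; rfl
  | cons a rest ih =>
    intro hp
    have ha : a ≠ 'c' := fun h => hp (h ▸ List.mem_cons_self)
    simp only [solLoopA, ha, if_false, Bool.false_eq_true]
    rw [ih (fun h => hp (List.mem_cons_of_mem _ h))]
    rfl

theorem solLoopA_false_append : ∀ (p l : List Char), 'c' ∉ p →
    solLoopA (p ++ l) (-1) false = List.replicate p.length (-1) ++ solLoopA l (-1) false := by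
  intro p
  induction p with
  | nil => intro l _; simp
  | cons a rest ih =>
    intro l h
    have ha : a ≠ 'c' := fun hh => h (hh ▸ List.mem_cons_self)
    rw [List.cons_append]
    simp only [solLoopA, ha, if_false, Bool.false_eq_true]
    rw [ih l (fun hh => h (List.mem_cons_of_mem _ hh))]
    rfl

-- the value of B's tail loop starting just AFTER a 'c' (the 'c' itself emitted 0 separately)
def partsOutTail : List (List Char) → List Int
  | [] => []
  | p :: ps => PySem.List.pyRange 1 (p.length + 1) 1 ++ partsOut ps

theorem partsOut_cons (p : List Char) (ps : List (List Char)) :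
    partsOut (p :: ps) = 0 :: partsOutTail (p :: ps) := by
  simp only [partsOut, partsOutTail]
  rw [PySem.List.pyRange_one_cons (by omega)]
  simp

-- every 'c'-containing list decomposes at its FIRST 'c'
theorem first_c_decomp : ∀ (cs : List Char), 'c' ∈ cs →
    ∃ p rest, cs = p ++ 'c' :: rest ∧ 'c' ∉ p := by
  intro cs
  induction cs with
  | nil => intro h; cases h
  | cons a rest ih =>
    intro h
    by_cases ha : a = 'c'
    · exact ⟨[], rest, by simp [ha], by simp⟩
    · have hr : 'c' ∈ rest := by
        rcases List.mem_cons.mp h with h' | h'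
        · exact absurd h'.symm ha
        · exact h'
      obtain ⟨p, r, hdec, hp⟩ := ih hr
      refine ⟨a :: p, r, by simp [hdec], ?_⟩
      intro hmem
      rcases List.mem_cons.mp hmem with h' | h'
      · exact ha h'.symm
      · exact hp h'

-- A's loop with flag true equals B's tail-block construction on the split pieces
theorem solLoopA_true_eq : ∀ (n : Nat) (cs : List Char), cs.length ≤ n →
    solLoopA cs 0 true = partsOutTail (PySem.Chars.splitOn cs ['c']) := by
  intro n
  induction n with
  | zero =>
    intro cs h
    have : cs = [] := List.eq_nil_of_length_eq_zero (Nat.le_zero.mp h)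
    subst this
    simp [solLoopA, splitOn_eq_spec, splitSpec, partsOutTail, partsOut,
      PySem.List.pyRange_one_eq_nil]
  | succ n ih =>
    intro cs hlen
    by_cases hc : 'c' ∈ cs
    · obtain ⟨p, rest, hdec, hp⟩ := first_c_decomp cs hc
      subst hdec
      rw [splitOn_first_c p rest hp]
      rw [solLoopA_true_append p ('c' :: rest) 0 hp]
      have hrest : rest.length ≤ n := by
        have := hlen; simp at this; omega
      have hA : solLoopA ('c' :: rest) (0 + p.length) true = 0 :: solLoopA rest 0 true := by
        simp [solLoopA]
      rw [hA, ih rest hrest]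
      cases hsp : PySem.Chars.splitOn rest ['c'] with
      | nil => exact absurd ((splitOn_eq_spec rest) ▸ hsp) (splitSpec_ne_nil rest [])
      | cons q qs =>
        simp only [partsOutTail]
        rw [partsOut_cons]
        simp only [partsOutTail]
        norm_num
        rw [Int.add_comm]
    · rw [splitOn_no_c cs hc]
      rw [solLoopA_true_no_c cs 0 hc]
      simp only [partsOutTail, partsOut, List.append_nil]
      norm_num
      congr 1
      omega

-- per-row equality: A's scan equals B's split-and-blocks construction
theorem row_eq (cs : List Char) :
    solLoopA cs (-1) false
      = match PySem.Chars.splitOn cs ['c'] with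
        | [] => []
        | p0 :: rest => List.replicate p0.length (-1) ++ partsOut rest := by
  by_cases hc : 'c' ∈ cs
  · obtain ⟨p, rest, hdec, hp⟩ := first_c_decomp cs hc
    subst hdec
    rw [splitOn_first_c p rest hp]
    rw [solLoopA_false_append p ('c' :: rest) hp]
    have hA : solLoopA ('c' :: rest) (-1) false = 0 :: solLoopA rest 0 true := by
      simp [solLoopA]
    rw [hA, solLoopA_true_eq rest.length rest le_rfl]
    cases hsp : PySem.Chars.splitOn rest ['c'] with
    | nil => exact absurd ((splitOn_eq_spec rest) ▸ hsp) (splitSpec_ne_nil rest [])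
    | cons q qs =>
      show _ = List.replicate p.length (-1) ++ partsOut (q :: qs)
      rw [partsOut_cons]
  · rw [splitOn_no_c cs hc, solLoopA_false_no_c cs hc]
    simp [partsOut]

-- ===== VERDICT (by name: the statement is the Claim_ definition above) =====
theorem solution_spec : Claim_equal_solution := by
  intro cloudList _
  unfold Spec_solution solution solution_alt
  exact List.map_congr_left (fun s _ => row_eq s.toList)
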